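-- pv_equiv track=rewrite | github.com/georgexrysiko/ComputerScienceProject | askisi9.py | maxConsecutiveDigit
-- ===== SOURCE A (Python) =====
-- def maxConsecutiveDigit(num, d):
--     count = 0
--     max = 0
--     for digit in num:
--         if digit == d:
--             count+=1
--             if max < count:
--                 max = count
--         else:
--             count=0
--     return max
-- ===== SOURCE B (Python) =====
-- def maxConsecutiveDigit(num, d):
--     # run-at-a-time scan: jump over each maximal run of d and keep the longest
--     best = 0
--     i = 0
--     n = len(num)
--     while i < n:
--         if num[i] == d:
--             j = i + 1
--             while j < n and num[j] == d:
--                 j += 1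
--             if j - i > best:
--                 best = j - i
--             i = j
--         else:
--             i += 1
--     return best
-- ===== Notes on version B (the rewrite author's own statement) =====
-- stated objective: alternative
-- what changed: B scans run-at-a-time: on hitting d it consumes the whole maximal run with an inner scan and jumps past it, keeping the longest run, instead of A's single stateful pass maintaining a reset counter per character.
import Mathlib
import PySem

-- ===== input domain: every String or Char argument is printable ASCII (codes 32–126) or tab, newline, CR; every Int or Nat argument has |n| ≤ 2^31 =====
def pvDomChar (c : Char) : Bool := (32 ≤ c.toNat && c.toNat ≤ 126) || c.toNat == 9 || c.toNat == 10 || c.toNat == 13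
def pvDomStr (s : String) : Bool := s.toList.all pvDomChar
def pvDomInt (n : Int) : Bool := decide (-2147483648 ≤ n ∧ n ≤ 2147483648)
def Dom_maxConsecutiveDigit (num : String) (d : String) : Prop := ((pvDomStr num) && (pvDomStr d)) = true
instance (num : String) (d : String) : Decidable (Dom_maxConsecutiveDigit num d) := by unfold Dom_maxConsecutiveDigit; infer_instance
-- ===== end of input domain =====

-- B replaces A's stateful per-character counter with a run-at-a-time scan
-- (consume each maximal run of d, keep the longest); same O(n) cost.

-- ===== PORT A =====
-- A's loop: state (count, max) updated once per character.
def mcdLoopA (d : String) : List Char → Int → Int → Int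
  | [], _count, m => m
  | c :: rest, count, m =>
    if String.singleton c == d then
      mcdLoopA d rest (count + 1) (if m < count + 1 then count + 1 else m)
    else
      mcdLoopA d rest 0 m

def maxConsecutiveDigit (num : String) (d : String) : Int :=
  mcdLoopA d num.toList 0 0

-- ===== PORT B =====
-- B's outer loop: on a matching character, the inner scan (takeWhile/dropWhile
-- mirrors Source B's inner `while j < n and num[j] == d`) consumes the whole run.
def mcdGoB (d : String) : List Char → Int → Int
  | [], best => best
  | c :: rest, best =>
    if String.singleton c == d then
      let run := rest.takeWhile (fun x => String.singleton x == d)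
      mcdGoB d (rest.dropWhile (fun x => String.singleton x == d))
        (if 1 + (run.length : Int) > best then 1 + (run.length : Int) else best)
    else
      mcdGoB d rest best
termination_by l _ => l.length
decreasing_by
  · exact Nat.lt_succ_of_le (List.length_dropWhile_le _ _)
  · exact Nat.lt_succ_self _

def maxConsecutiveDigit_alt (num : String) (d : String) : Int :=
  mcdGoB d num.toList 0

-- ===== PRECONDITION & SPEC =====
def Spec_maxConsecutiveDigit (num : String) (d : String) (out : Int) : Prop := out = maxConsecutiveDigit_alt num d
instance (num : String) (d : String) (out : Int) : Decidable (Spec_maxConsecutiveDigit num d out) := by unfold Spec_maxConsecutiveDigit; infer_instance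

-- ===== CLAIM (what is proved, stated in full; the proofs are below) =====
def Claim_equal_maxConsecutiveDigit : Prop := ∀ (num : String) (d : String), Dom_maxConsecutiveDigit num d → Spec_maxConsecutiveDigit num d (maxConsecutiveDigit num d)

-- ===== LEMMAS AND PROOFS =====

-- A's max-update is the Int max.
lemma mcdLoopA_cons_pos (d : String) (c : Char) (rest : List Char) (count m : Int)
    (h : (String.singleton c == d) = true) :
    mcdLoopA d (c :: rest) count m = mcdLoopA d rest (count + 1) (max m (count + 1)) := by
  simp only [mcdLoopA, if_pos h]
  congr 1
  split_ifs <;> omega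

lemma mcdLoopA_cons_neg (d : String) (c : Char) (rest : List Char) (count m : Int)
    (h : ¬ (String.singleton c == d) = true) :
    mcdLoopA d (c :: rest) count m = mcdLoopA d rest 0 m := by
  simp only [mcdLoopA, if_neg h]

-- the head of a dropWhile result never satisfies the predicate.
lemma mcdDropWhile_head_false (p : Char → Bool) :
    ∀ (l : List Char) (c' : Char) (tail : List Char),
      l.dropWhile p = c' :: tail → p c' = false := by
  intro l
  induction l with
  | nil => intro c' tail h; simp [List.dropWhile] at h
  | cons a l ih =>
    intro c' tail h
    rw [List.dropWhile_cons] at h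
    by_cases ha : p a = true
    · rw [if_pos ha] at h; exact ih c' tail h
    · rw [if_neg ha] at h
      obtain ⟨rfl, -⟩ := List.cons.injEq .. ▸ h
      simpa using ha

-- consuming a block of matching characters: the counter climbs through the run
-- and the maximum ends at max m (count + run length) (invariant: count ≤ m).
lemma mcdLoopA_run (d : String) (run rest' : List Char)
    (hrun : ∀ c ∈ run, (String.singleton c == d) = true) :
    ∀ count m : Int, count ≤ m →
      mcdLoopA d (run ++ rest') count m
        = mcdLoopA d rest' (count + run.length) (max m (count + run.length)) := by
  induction run with
  | nil =>
    intro count m hcm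
    simp only [List.nil_append, List.length_nil]
    congr 1 <;> omega
  | cons c run ih =>
    intro count m hcm
    have hc := hrun c (List.mem_cons_self ..)
    rw [List.cons_append, mcdLoopA_cons_pos d c _ _ _ hc,
        ih (fun x hx => hrun x (List.mem_cons_of_mem _ hx)) (count + 1) (max m (count + 1)) (le_max_right _ _)]
    congr 1 <;> · simp only [List.length_cons]; push_cast; omega

-- main equivalence of the two loops, by strong induction on the length.
lemma mcdLoopA_eq_goB (d : String) :
    ∀ (n : Nat) (l : List Char), l.length ≤ n → ∀ best : Int, 0 ≤ best →
      mcdLoopA d l 0 best = mcdGoB d l best := by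
  intro n
  induction n with
  | zero =>
    intro l hl best _
    rw [List.length_eq_zero_iff.mp (Nat.le_zero.mp hl)]
    simp [mcdLoopA, mcdGoB]
  | succ n ih =>
    intro l hl best hbest
    match l with
    | [] => simp [mcdLoopA, mcdGoB]
    | c :: rest =>
      by_cases h : (String.singleton c == d) = true
      · have hsplit : rest
            = rest.takeWhile (fun x => String.singleton x == d)
              ++ rest.dropWhile (fun x => String.singleton x == d) :=
          (List.takeWhile_append_dropWhile ..).symm
        have hrunmem : ∀ x ∈ rest.takeWhile (fun x => String.singleton x == d),
            (String.singleton x == d) = true := by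
          intro x hx
          exact List.mem_takeWhile_imp (p := fun x => String.singleton x == d) hx
        rw [mcdLoopA_cons_pos d c rest 0 best h]
        conv_lhs => rw [hsplit]
        rw [mcdLoopA_run d _ _ hrunmem (0 + 1) (max best (0 + 1)) (by omega)]
        have hgoal :
            mcdGoB d (c :: rest) best
              = mcdGoB d (rest.dropWhile (fun x => String.singleton x == d))
                  (if 1 + ((rest.takeWhile (fun x => String.singleton x == d)).length : Int) > best then
                    1 + ((rest.takeWhile (fun x => String.singleton x == d)).length : Int) else best) := by
          simp only [mcdGoB, if_pos h]
        rw [hgoal]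
        set L : Int := ((rest.takeWhile (fun x => String.singleton x == d)).length : Int) with hL
        have hLnn : 0 ≤ L := by positivity
        have hm : max (max best (0 + 1)) (0 + 1 + L) = (if 1 + L > best then 1 + L else best) := by
          split_ifs <;> omega
        rw [hm]
        have hMnn : 0 ≤ (if 1 + L > best then 1 + L else best) := by split_ifs <;> omega
        have hlen : (rest.dropWhile (fun x => String.singleton x == d)).length ≤ n := by
          have h1 := List.length_dropWhile_le (fun x => String.singleton x == d) rest
          simp only [List.length_cons] at hl
          omega
        match hdw : rest.dropWhile (fun x => String.singleton x == d) with
        | [] => simp only [mcdLoopA, mcdGoB]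
        | c' :: tail =>
          have hc' : ¬ (String.singleton c' == d) = true := by
            have := mcdDropWhile_head_false (fun x => String.singleton x == d) rest c' tail hdw
            simpa using this
          have htail : tail.length ≤ n := by
            rw [hdw] at hlen; simp only [List.length_cons] at hlen; omega
          rw [mcdLoopA_cons_neg d c' tail _ _ hc',
            ih tail htail _ hMnn]
          simp only [mcdGoB, if_neg hc']
      · rw [mcdLoopA_cons_neg d c rest 0 best h]
        have : rest.length ≤ n := by simp only [List.length_cons] at hl; omega
        rw [ih rest this best hbest]
        simp only [mcdGoB, if_neg h]

-- ===== VERDICT (by name: the statement is the Claim_ definition above) =====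
theorem maxConsecutiveDigit_spec : Claim_equal_maxConsecutiveDigit := by
  intro num d _
  unfold Spec_maxConsecutiveDigit maxConsecutiveDigit maxConsecutiveDigit_alt
  exact mcdLoopA_eq_goB d num.toList.length num.toList le_rfl 0 le_rfl
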